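-- pv_equiv track=rewrite | github.com/aglahir1/Advent-of-Code | Advent of Code/2023/12.py | isSuitable
-- ===== SOURCE A (Python) =====
-- def isSuitable(springs, score):
--     i = springs.find('?')
--     springs = springs[:i] + '#'
--     pointer = 0
--     curr = 0
--     result = []
--     for c in springs:
--         if c == '#':
--             curr += 1
--         if c == '.':
--             if pointer >= len(score) or curr > score[pointer]:
--                 return False
--             else:
--                 if curr > 0:
--                     pointer += 1
--                     curr = 0
--     return True
-- ===== SOURCE B (Python) =====
-- def isSuitable(springs, score):
--     i = springs.find('?')
--     prefix = springs[:i] + '#'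
--     segments = prefix.split('.')
--     pointer = 0
--     for seg in segments[:-1]:
--         curr = seg.count('#')
--         if pointer >= len(score) or curr > score[pointer]:
--             return False
--         if curr > 0:
--             pointer += 1
--     return True
-- ===== Notes on version B (the rewrite author's own statement) =====
-- stated objective: simpler
-- what changed: B splits the transformed prefix on '.' and validates one dot-terminated segment at a time (count of '#' per segment) instead of A's character-by-character scan that threads a running counter and reset logic through every character.
import Mathlib
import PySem

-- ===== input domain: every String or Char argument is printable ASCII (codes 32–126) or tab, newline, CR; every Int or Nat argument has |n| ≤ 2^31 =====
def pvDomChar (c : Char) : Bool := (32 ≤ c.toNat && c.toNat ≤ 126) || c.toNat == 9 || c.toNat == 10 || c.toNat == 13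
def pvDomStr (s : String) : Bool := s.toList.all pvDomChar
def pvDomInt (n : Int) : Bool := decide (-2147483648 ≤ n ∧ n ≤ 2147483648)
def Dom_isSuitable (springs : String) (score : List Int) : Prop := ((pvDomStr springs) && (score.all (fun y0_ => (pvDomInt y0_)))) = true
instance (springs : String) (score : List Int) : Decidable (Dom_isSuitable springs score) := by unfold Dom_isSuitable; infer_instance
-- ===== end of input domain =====

-- B replaces A's single character-by-character scan with prefix.split('.') followed by a
-- per-segment check loop (objective: simpler decomposition; same asymptotic cost).

-- ===== PORT A =====
-- the for-loop of A: state is (pointer, curr); early 'return False' ends the recursion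
def isSuitableGo (score : List Int) : List Char → Nat → Int → Bool
  | [], _, _ => true
  | c :: cs, pointer, curr =>
    let curr2 := if c = '#' then curr + 1 else curr
    if c = '.' then
      if pointer ≥ score.length ∨ curr2 > score.getD pointer 0 then false
      else if curr2 > 0 then isSuitableGo score cs (pointer + 1) 0
      else isSuitableGo score cs pointer curr2
    else isSuitableGo score cs pointer curr2

def isSuitable (springs : String) (score : List Int) : Bool :=
  -- i = springs.find('?'); springs = springs[:i] + '#'
  isSuitableGo score
    (PySem.List.slice springs.toList none (some (PySem.Str.find springs "?")) ++ ['#']) 0 0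

-- ===== PORT B =====
-- the for-loop of B over segments[:-1]: state is pointer; curr = seg.count('#')
def isSuitableAltGo (score : List Int) : List (List Char) → Nat → Bool
  | [], _ => true
  | seg :: rest, pointer =>
    let curr : Int := (PySem.Chars.count seg ['#'] : Int)
    if pointer ≥ score.length ∨ curr > score.getD pointer 0 then false
    else isSuitableAltGo score rest (if curr > 0 then pointer + 1 else pointer)

def isSuitable_alt (springs : String) (score : List Int) : Bool :=
  -- prefix = springs[:i] + '#'; segments = prefix.split('.'); loop over segments[:-1]
  isSuitableAltGo score
    (PySem.List.slice
      (PySem.Chars.splitOn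
        (PySem.List.slice springs.toList none (some (PySem.Str.find springs "?")) ++ ['#']) ['.'])
      none (some (-1))) 0

-- ===== PRECONDITION & SPEC =====
def Spec_isSuitable (springs : String) (score : List Int) (out : Bool) : Prop := out = isSuitable_alt springs score
instance (springs : String) (score : List Int) (out : Bool) : Decidable (Spec_isSuitable springs score out) := by unfold Spec_isSuitable; infer_instance

-- ===== CLAIM (what is proved, stated in full; the proofs are below) =====
def Claim_equal_isSuitable : Prop := ∀ (springs : String) (score : List Int), Dom_isSuitable springs score → Spec_isSuitable springs score (isSuitable springs score)

-- ===== LEMMAS AND PROOFS =====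

-- equation lemmas for the fuel-based PySem primitives, specialised to one-character arguments
lemma count_go_nil (fuel acc : Nat) :
    PySem.Chars.count.go ['#'] fuel [] acc = acc := by
  cases fuel <;> simp [PySem.Chars.count.go]

lemma count_go_cons (fuel acc : Nat) (c : Char) (cs : List Char) :
    PySem.Chars.count.go ['#'] (fuel + 1) (c :: cs) acc =
      if c = '#' then PySem.Chars.count.go ['#'] fuel cs (acc + 1)
      else PySem.Chars.count.go ['#'] fuel cs acc := by
  by_cases hc : c = '#' <;>
    simp [PySem.Chars.count.go, List.isPrefixOf, hc, Ne.symm]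

lemma count_go_hash : ∀ (l : List Char) (fuel acc : Nat), l.length ≤ fuel →
    PySem.Chars.count.go ['#'] fuel l acc = acc + l.count '#' := by
  intro l
  induction l with
  | nil => intro fuel acc _; simp [count_go_nil]
  | cons c cs ih =>
    intro fuel acc h
    cases fuel with
    | zero => simp at h
    | succ f =>
      rw [count_go_cons]
      by_cases hc : c = '#'
      · rw [if_pos hc, ih f (acc + 1) (by simp at h; omega)]
        simp [List.count_cons, hc]
        omega
      · rw [if_neg hc, ih f acc (by simp at h; omega)]
        simp [List.count_cons, hc]

-- str.count of the single character '#' counts the '#' characters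
lemma count_hash (l : List Char) : PySem.Chars.count l ['#'] = l.count '#' := by
  have h : PySem.Chars.count l ['#'] = PySem.Chars.count.go ['#'] l.length l 0 := by
    simp [PySem.Chars.count]
  rw [h, count_go_hash l l.length 0 le_rfl]
  omega

-- split on '.' written as a direct structural recursion with a current-segment accumulator
def mySplit : List Char → List Char → List (List Char)
  | [], cur => [cur.reverse]
  | c :: cs, cur => if c = '.' then cur.reverse :: mySplit cs [] else mySplit cs (c :: cur)

lemma mySplit_ne_nil : ∀ (l cur : List Char), mySplit l cur ≠ [] := by
  intro l
  induction l with
  | nil => intro cur; simp [mySplit]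
  | cons c cs ih => intro cur; by_cases h : c = '.' <;> simp [mySplit, h, ih]

lemma splitOn_go_nil (fuel : Nat) (cur : List Char) (acc : List (List Char)) :
    PySem.Chars.splitOn.go ['.'] fuel [] cur acc = (cur.reverse :: acc).reverse := by
  cases fuel <;> simp [PySem.Chars.splitOn.go]

lemma splitOn_go_cons (fuel : Nat) (c : Char) (cs cur : List Char) (acc : List (List Char)) :
    PySem.Chars.splitOn.go ['.'] (fuel + 1) (c :: cs) cur acc =
      if c = '.' then PySem.Chars.splitOn.go ['.'] fuel cs [] (cur.reverse :: acc)
      else PySem.Chars.splitOn.go ['.'] fuel cs (c :: cur) acc := by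
  by_cases hc : c = '.' <;>
    simp [PySem.Chars.splitOn.go, List.isPrefixOf, hc, Ne.symm]

lemma splitOn_go_dot : ∀ (l : List Char) (fuel : Nat) (cur : List Char) (acc : List (List Char)),
    l.length < fuel →
    PySem.Chars.splitOn.go ['.'] fuel l cur acc = acc.reverse ++ mySplit l cur := by
  intro l
  induction l with
  | nil =>
    intro fuel cur acc _
    rw [splitOn_go_nil]
    simp [mySplit]
  | cons c cs ih =>
    intro fuel cur acc h
    cases fuel with
    | zero => simp at h
    | succ f =>
      rw [splitOn_go_cons]
      by_cases hc : c = '.'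
      · rw [if_pos hc, ih f [] (cur.reverse :: acc) (by simp at h; omega)]
        simp [mySplit, hc]
      · rw [if_neg hc, ih f (c :: cur) acc (by simp at h; omega)]
        simp [mySplit, hc]

lemma splitOn_dot (l : List Char) : PySem.Chars.splitOn l ['.'] = mySplit l [] := by
  have h := splitOn_go_dot l (l.length + 1) [] [] (by omega)
  simpa [PySem.Chars.splitOn] using h

-- readable equation lemmas for the two port loops
lemma goA_cons_dot (score : List Int) (cs : List Char) (p : Nat) (curr : Int) :
    isSuitableGo score ('.' :: cs) p curr =
      if p ≥ score.length ∨ curr > score.getD p 0 then false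
      else if curr > 0 then isSuitableGo score cs (p + 1) 0
      else isSuitableGo score cs p curr := by
  simp [isSuitableGo]

lemma goA_cons_not_dot (score : List Int) (c : Char) (cs : List Char) (p : Nat) (curr : Int)
    (h : c ≠ '.') :
    isSuitableGo score (c :: cs) p curr =
      isSuitableGo score cs p (if c = '#' then curr + 1 else curr) := by
  by_cases hc : c = '#' <;> simp [isSuitableGo, h, hc]

lemma altGo_cons (score : List Int) (seg : List Char) (rest : List (List Char)) (p : Nat) :
    isSuitableAltGo score (seg :: rest) p =
      if p ≥ score.length ∨ (PySem.Chars.count seg ['#'] : Int) > score.getD p 0 then false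
      else isSuitableAltGo score rest
        (if (PySem.Chars.count seg ['#'] : Int) > 0 then p + 1 else p) := by
  simp [isSuitableAltGo]

-- B's loop generalised with a first-segment offset 'base' (the '#'s A has already counted)
def altGen (score : List Int) : List (List Char) → Nat → Int → Bool
  | [], _, _ => true
  | [_], _, _ => true
  | seg :: rest, p, base =>
    if p ≥ score.length ∨ base + (seg.count '#' : Int) > score.getD p 0 then false
    else altGen score rest (if base + (seg.count '#' : Int) > 0 then p + 1 else p) 0

lemma altGen_cons₂ (score : List Int) (seg a : List Char) (t : List (List Char)) (p : Nat)
    (base : Int) :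
    altGen score (seg :: a :: t) p base =
      if p ≥ score.length ∨ base + (seg.count '#' : Int) > score.getD p 0 then false
      else altGen score (a :: t) (if base + (seg.count '#' : Int) > 0 then p + 1 else p) 0 := by
  simp [altGen]

-- A's scan equals B's segment walk: A's curr = base + number of '#' in the pending segment
lemma main_loop (score : List Int) : ∀ (l cur : List Char) (p : Nat) (base : Int), 0 ≤ base →
    isSuitableGo score l p (base + (cur.count '#' : Int)) = altGen score (mySplit l cur) p base := by
  intro l
  induction l with
  | nil => intro cur p base _; simp [isSuitableGo, mySplit, altGen]
  | cons c cs ih =>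
    intro cur p base hb
    by_cases hdot : c = '.'
    · subst hdot
      obtain ⟨a, t, ht⟩ : ∃ a t, mySplit cs [] = a :: t := by
        cases h : mySplit cs [] with
        | nil => exact absurd h (mySplit_ne_nil cs [])
        | cons a t => exact ⟨a, t, rfl⟩
      rw [show mySplit ('.' :: cs) cur = cur.reverse :: mySplit cs [] from by simp [mySplit]]
      rw [ht, goA_cons_dot, altGen_cons₂, List.count_reverse]
      have hcnt : (0 : Int) ≤ (cur.count '#' : Int) := Int.natCast_nonneg _
      have ihx0 := ih [] (p + 1) 0 le_rfl
      have ihx1 := ih [] p 0 le_rfl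
      simp only [List.count_nil, Int.natCast_zero, add_zero, ht] at ihx0 ihx1
      split_ifs with h1 h2
      · rfl
      · exact ihx0
      · have hz : base + (cur.count '#' : Int) = 0 := by omega
        rw [hz] at *
        exact ihx1
    · rw [goA_cons_not_dot score c cs p _ hdot]
      rw [show mySplit (c :: cs) cur = mySplit cs (c :: cur) from by simp [mySplit, hdot]]
      rw [← ih (c :: cur) p base hb]
      congr 1
      by_cases hhash : c = '#' <;> simp [List.count_cons, hhash] <;> push_cast <;> ring

-- altGen at base = 0 is exactly B's loop over segments[:-1]
lemma altGen_eq_altGo (score : List Int) : ∀ (segs : List (List Char)) (p : Nat),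
    altGen score segs p 0 = isSuitableAltGo score segs.dropLast p := by
  intro segs
  induction segs with
  | nil => intro p; simp [altGen, isSuitableAltGo]
  | cons a tail ih =>
    intro p
    cases tail with
    | nil => simp [altGen, isSuitableAltGo]
    | cons b rest =>
      rw [altGen_cons₂, List.dropLast_cons₂, altGo_cons, count_hash]
      simp only [zero_add]
      split_ifs with h1
      · rfl
      all_goals exact ih _

-- ===== VERDICT (by name: the statement is the Claim_ definition above) =====
theorem isSuitable_spec : Claim_equal_isSuitable := by
  intro springs score _
  unfold Spec_isSuitable isSuitable isSuitable_alt
  rw [PySem.List.slice_to_neg_one, splitOn_dot, ← altGen_eq_altGo]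
  have h := main_loop score
    (PySem.List.slice springs.toList none (some (PySem.Str.find springs "?")) ++ ['#']) [] 0 0 le_rfl
  simpa using h
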